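-- pv_equiv track=rewrite | github.com/in03/patchwork | src/patchwork/helpers.py | blacklist_filter_dict
-- ===== SOURCE A (Python) =====
-- from copy import deepcopy
--
-- def blacklist_filter_dict(d: dict[str, str], fpl: list[str]) -> dict[str, str]:
--     """
--     Remove all items from `d` prefixed with a string matching a str in `fpl`
--
--     Args:
--         d (dict[str, str]): dictionary to operate on
--         fpl (list[str]): list of forbidden prefixes used for blacklist
--
--     Returns:
--         dict[str, str]: return modified dictionary
--     """
--
--     d = deepcopy(d)
--
--     for k in list(d.keys()):
--         for fp in fpl:
--             if k.startswith(fp):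
--                 d.pop(k)
--                 break
--     return d
-- ===== SOURCE B (Python) =====
-- def blacklist_filter_dict(d: dict[str, str], fpl: list[str]) -> dict[str, str]:
--     # Index the forbidden prefixes in a hash set once, then test each key by
--     # probing all of its own prefixes against the set (no scan over fpl per key).
--     fps = set(fpl)
--     return {k: v for k, v in d.items()
--             if not any(k[:i] in fps for i in range(len(k) + 1))}
-- ===== Notes on version B (the rewrite author's own statement) =====
-- stated objective: alternative
-- what changed: B replaces A's per-key scan over the forbidden-prefix list (pop-from-a-copied-dict on first match) with a hash set of the prefixes probed by each key's own prefixes, building the result by filtering instead of deleting.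
import Mathlib
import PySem

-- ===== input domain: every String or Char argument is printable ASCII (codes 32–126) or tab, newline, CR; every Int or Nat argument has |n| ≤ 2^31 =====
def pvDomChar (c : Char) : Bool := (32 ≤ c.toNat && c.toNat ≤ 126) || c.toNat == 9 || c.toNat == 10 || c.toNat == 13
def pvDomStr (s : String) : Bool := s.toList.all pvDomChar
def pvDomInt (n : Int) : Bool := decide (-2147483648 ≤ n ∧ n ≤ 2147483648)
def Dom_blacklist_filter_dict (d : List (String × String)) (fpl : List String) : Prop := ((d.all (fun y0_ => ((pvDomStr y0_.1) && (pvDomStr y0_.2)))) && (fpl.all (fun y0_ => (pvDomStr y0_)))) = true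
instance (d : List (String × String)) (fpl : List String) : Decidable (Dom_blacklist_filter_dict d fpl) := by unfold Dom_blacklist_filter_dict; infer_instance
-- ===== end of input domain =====

-- B indexes the forbidden prefixes in a set and keeps the entries whose key has no prefix in it (filter), instead of A's per-key scan over fpl with dict pops.


-- ===== PORT A =====
-- d.pop(k): remove the (unique) entry with key k; on the assoc-list dict this is erase-first-match
def pvPopA (acc : List (String × String)) (k : String) : List (String × String) :=
  acc.eraseP (fun p => p.1 == k)

-- inner loop: 'for fp in fpl: if k.startswith(fp): d.pop(k); break'
def pvInnerA (acc : List (String × String)) (k : String) : List String → List (String × String)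
  | [] => acc
  | fp :: rest => if PySem.Str.startswith k fp then pvPopA acc k else pvInnerA acc k rest

def blacklist_filter_dict (d : List (String × String)) (fpl : List String) : List (String × String) :=
  -- d = deepcopy(d); for k in list(d.keys()): inner loop
  (d.map Prod.fst).foldl (fun acc k => pvInnerA acc k fpl) d

-- ===== PORT B =====
-- not any(k[:i] in fps for i in range(len(k)+1))   (len(k) = number of code points of k)
def pvBanned (fps : PySem.Set String) (k : String) : Bool :=
  (List.range (k.toList.length + 1)).any
    (fun i => PySem.Set.contains fps (PySem.Str.slice k none (some (i : Int))))

def blacklist_filter_dict_alt (d : List (String × String)) (fpl : List String) : List (String × String) :=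
  let fps := PySem.Set.ofList fpl
  d.filter (fun p => ! pvBanned fps p.1)

-- ===== PRECONDITION & SPEC =====
def Spec_blacklist_filter_dict (d : List (String × String)) (fpl : List String) (out : List (String × String)) : Prop := out = blacklist_filter_dict_alt d fpl
instance (d : List (String × String)) (fpl : List String) (out : List (String × String)) : Decidable (Spec_blacklist_filter_dict d fpl out) := by unfold Spec_blacklist_filter_dict; infer_instance

-- ===== CLAIM (what is proved, stated in full; the proofs are below) =====
def Claim_equal_blacklist_filter_dict : Prop := ∀ (d : List (String × String)) (fpl : List String), Dom_blacklist_filter_dict d fpl → Spec_blacklist_filter_dict d fpl (blacklist_filter_dict d fpl)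

-- ===== LEMMAS AND PROOFS =====

-- A's inner loop pops (erases) the key iff some prefix in fpl matches
def pvBadA (fpl : List String) (k : String) : Bool :=
  fpl.any (fun fp => PySem.Str.startswith k fp)

-- the body of A's outer loop, in guarded form
def pvStepA (fpl : List String) (acc : List (String × String)) (k : String) : List (String × String) :=
  if pvBadA fpl k then acc.eraseP (fun p => p.1 == k) else acc

theorem pvInnerA_eq (acc : List (String × String)) (k : String) (fpl : List String) :
    pvInnerA acc k fpl = pvStepA fpl acc k := by
  induction fpl with
  | nil => simp [pvInnerA, pvStepA, pvBadA]
  | cons fp rest ih =>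
    by_cases h : PySem.Chars.startswith k.toList fp.toList = true
    · simp [pvInnerA, pvStepA, pvBadA, pvPopA, h]
    · simp [pvInnerA, pvStepA, pvBadA, h, ih]

theorem pvStep_fun_eq (fpl : List String) :
    (fun (acc : List (String × String)) k => pvInnerA acc k fpl) = pvStepA fpl := by
  funext acc k; exact pvInnerA_eq acc k fpl

theorem pvFold_cons_of_good (fpl : List String) (p : String × String)
    (hp : pvBadA fpl p.1 = false) (ks : List String) :
    ∀ acc : List (String × String),
      ks.foldl (pvStepA fpl) (p :: acc) = p :: ks.foldl (pvStepA fpl) acc := by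
  induction ks with
  | nil => intro acc; simp
  | cons k ks ih =>
    intro acc
    simp only [List.foldl_cons, pvStepA]
    cases h : pvBadA fpl k with
    | true =>
      have hne : (p.1 == k) = false := by
        by_contra hc
        have hb : (p.1 == k) = true := by
          cases hb : (p.1 == k) with
          | false => exact absurd hb hc
          | true => rfl
        rw [eq_of_beq hb] at hp; rw [hp] at h; exact Bool.false_ne_true h
      rw [if_pos rfl, if_pos rfl, List.eraseP_cons, hne]
      simp only [cond_false]
      exact ih _
    | false =>
      rw [if_neg (by simp), if_neg (by simp)]
      exact ih acc

theorem pvFold_eq_filter (fpl : List String) :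
    ∀ d : List (String × String),
      (d.map Prod.fst).foldl (pvStepA fpl) d = d.filter (fun p => ! pvBadA fpl p.1) := by
  intro d
  induction d with
  | nil => simp
  | cons p t ih =>
    simp only [List.map_cons, List.foldl_cons]
    cases h : pvBadA fpl p.1 with
    | true =>
      have h1 : pvStepA fpl (p :: t) p.1 = t := by
        simp [pvStepA, h]
      rw [h1, ih, List.filter_cons]
      simp [h]
    | false =>
      have h1 : pvStepA fpl (p :: t) p.1 = p :: t := by
        simp [pvStepA, h]
      rw [h1, pvFold_cons_of_good fpl p h, ih, List.filter_cons]
      simp [h]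

theorem pvSlice_toList (k : String) (i : Nat) :
    (PySem.Str.slice k none (some (i : Int))).toList = k.toList.take i := by
  simp [PySem.Str.toList_slice, PySem.Chars.slice_eq_listSlice, PySem.List.slice_to_natCast]

theorem pvBad_eq (fpl : List String) (k : String) :
    pvBadA fpl k = pvBanned (PySem.Set.ofList fpl) k := by
  rw [Bool.eq_iff_iff]
  simp only [pvBadA, pvBanned, List.any_eq_true]
  constructor
  · rintro ⟨fp, hmem, hsw⟩
    have hpre : fp.toList <+: k.toList := by
      simpa [PySem.Chars.startswith_iff] using hsw
    refine ⟨fp.toList.length, ?_, ?_⟩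
    · simp only [List.mem_range]
      exact Nat.lt_succ_of_le hpre.length_le
    · rw [PySem.Set.contains_iff, PySem.Set.mem_ofList]
      have htake : k.toList.take fp.toList.length = fp.toList :=
        (List.prefix_iff_eq_take.mp hpre).symm
      have hsl : (PySem.Str.slice k none (some (fp.toList.length : Int))).toList = fp.toList := by
        rw [pvSlice_toList, htake]
      have heq : PySem.Str.slice k none (some (fp.toList.length : Int)) = fp :=
        String.toList_injective hsl
      rwa [heq]
  · rintro ⟨i, _, hc⟩
    rw [PySem.Set.contains_iff, PySem.Set.mem_ofList] at hc
    refine ⟨_, hc, ?_⟩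
    have : (PySem.Str.slice k none (some (i : Int))).toList <+: k.toList := by
      rw [pvSlice_toList]; exact List.take_prefix _ _
    simpa [PySem.Chars.startswith_iff] using this

-- ===== VERDICT (by name: the statement is the Claim_ definition above) =====
theorem blacklist_filter_dict_spec : Claim_equal_blacklist_filter_dict := by
  intro d fpl _
  unfold Spec_blacklist_filter_dict blacklist_filter_dict blacklist_filter_dict_alt
  rw [pvStep_fun_eq, pvFold_eq_filter]
  exact List.filter_congr (fun p _ => by rw [pvBad_eq])
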